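/-
  jsmn_s.bin, `jsmn_parse_string`: the head of the outer loop (100228H) up to the dispatch on the current character.
-/
import Prog.Jsmn.S.StrInv

namespace X86
namespace J6
namespace S
namespace Str
open X86.User (CodeAt RegsKept Span FlagsOK Layout toNat_add_ofNat toNat_ofNat_lt' add_ofNat_add)
open Jsmn JsmnSBytes

set_option maxRecDepth 100000
set_option maxHeartbeats 4000000
set_option linter.unusedSimpArgs false
set_option linter.unusedVariables false

variable {c : SCtx} {n : User.Layout} {v0 v : User.State}

/-- At 10024FH: a backslash at `q` and `q + 1 < len`; ecx = eax = q + 1 (about to be stored), edx = q. -/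
def AtEsc (c : SCtx) (n : User.Layout) (v0 v : User.State) (q : Nat) : Prop :=
  At c n v0 v 0x10024f q ∧ v.reg .rcx = UInt64.ofNat (u32 ((q : Int) + 1)) ∧ v.reg .rax = UInt64.ofNat (u32 ((q : Int) + 1)) ∧ v.reg .rdx = UInt64.ofNat q

/-- 100228H → the loop test fails (→ 1001CAH with JSMN_ERROR_PART, `pos = start`) | the closing quote (100170H) | an ordinary character, or a
backslash that is the last character (100221H) | a backslash with `pos + 1 < len` (10024FH). -/
theorem head (he : Entry c n v0) {q : Nat} (ha : At c n v0 v 0x100228 q) (hq : q < c.js.length) :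
    Reach n v (fun v' =>
      (more c.js q = false ∧ AtRet c n v0 v' JSMN_ERROR_PART c.p c.toks) ∨
      (more c.js q = true ∧ charAt c.js q = 0x22 ∧ At c n v0 v' 0x100170 q) ∨
      (more c.js q = true ∧ charAt c.js q ≠ 0x22 ∧ ¬ (charAt c.js q = 0x5c ∧ u32 ((q : Int) + 1) < c.js.length) ∧ At c n v0 v' 0x100221 q) ∨
      (more c.js q = true ∧ charAt c.js q = 0x5c ∧ u32 ((q : Int) + 1) < c.js.length ∧ AtEsc c n v0 v' q)) := by
  obtain ⟨hp, hr8⟩ := he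
  obtain ⟨hrip, hf⟩ := ha
  have hW := hp.toksW
  v3_open hp hf hW
  j6_bin
  have hq32 : q < 2 ^ 32 := hf_core_parser_pos ▸ User.Mem.readLE4_lt _ _
  have hch := char_read hf_text q hq
  have hc8 := (charAt c.js q).toNat_lt
  have hpos : c.p.pos < 2 ^ 32 := hp_parser_pos ▸ User.Mem.readLE4_lt _ _
  have hlow : Word.low .w32 (UInt64.ofNat q) = UInt64.ofNat q := Word.low_of_lt _ (by show (UInt64.ofNat q).toNat < 2 ^ 32; v3_omega)
  have hlowp : Word.low .w32 (UInt64.ofNat c.p.pos) = UInt64.ofNat c.p.pos :=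
    Word.low_of_lt _ (by show (UInt64.ofNat c.p.pos).toNat < 2 ^ 32; v3_omega)
  v3_walk hf_core_code hp.call.fetch [hlow, hlowp] until [0x1001ca, 0x100170, 0x100221, 0x10024f]
  · -- a NUL
    have h0 : (charAt c.js q).toNat = 0 := by v3_omega
    exact Reach.done (Or.inl ⟨more_false_nul h0, by strs_fail⟩)
  · -- the closing quote
    have h0 : (charAt c.js q).toNat ≠ 0 := by v3_omega
    have h1 : (charAt c.js q).toNat = 34 := by v3_omega
    refine Reach.done (Or.inr (Or.inl ⟨more_true hq h0, byte_eq_ofNat_of_toNat h1 (by decide), by simp, ?_⟩))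
    strs_frame
    v3_frame hf_core_parser_pos
  · -- an ordinary character
    have h0 : (charAt c.js q).toNat ≠ 0 := by v3_omega
    have h1 : ¬ (charAt c.js q).toNat = 34 := by v3_omega
    have h2 : ¬ (charAt c.js q).toNat = 92 := by v3_omega
    refine Reach.done (Or.inr (Or.inr (Or.inl ⟨more_true hq h0, byte_ne_ofNat_of_toNat (k := 34) h1 (by decide), fun h => byte_ne_ofNat_of_toNat (k := 92) h2 (by decide) h.1, by simp, ?_⟩)))
    strs_frame
    v3_frame hf_core_parser_pos
  · -- a backslash, the last character
    have h0 : (charAt c.js q).toNat ≠ 0 := by v3_omega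
    have h1 : ¬ (charAt c.js q).toNat = 34 := by v3_omega
    have h3 : ¬ u32 ((q : Int) + 1) < c.js.length := by rw [u32_succ]; v3_omega
    refine Reach.done (Or.inr (Or.inr (Or.inl ⟨more_true hq h0, byte_ne_ofNat_of_toNat (k := 34) h1 (by decide), fun h => h3 h.2, by simp, ?_⟩)))
    strs_frame
    v3_frame hf_core_parser_pos
  · -- a backslash and `pos + 1 < len`
    have h0 : (charAt c.js q).toNat ≠ 0 := by v3_omega
    have h2 : (charAt c.js q).toNat = 92 := by v3_omega
    have h3 : u32 ((q : Int) + 1) < c.js.length := by rw [u32_succ]; v3_omega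
    have hx : Word.low .w32 (UInt64.ofNat q + 1) = UInt64.ofNat (u32 ((q : Int) + 1)) := by rw [u32_succ]; v3_omega
    refine Reach.done (Or.inr (Or.inr (Or.inr ⟨more_true hq h0, byte_eq_ofNat_of_toNat h2 (by decide), h3, ⟨by simp, ?_⟩, by v3_regnorm; exact hx, by v3_regnorm; exact hx, by v3_regnorm⟩)))
    strs_frame
    v3_frame hf_core_parser_pos

/-- 100228H → 1001CAH when the text is exhausted: JSMN_ERROR_PART, `pos = start`. -/
theorem head_end (he : Entry c n v0) {q : Nat} (ha : At c n v0 v 0x100228 q) (hq : c.js.length ≤ q) :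
    Reach n v (fun v' => AtRet c n v0 v' JSMN_ERROR_PART c.p c.toks) := by
  obtain ⟨hp, hr8⟩ := he
  obtain ⟨hrip, hf⟩ := ha
  have hW := hp.toksW
  v3_open hp hf hW
  j6_bin
  have hq32 : q < 2 ^ 32 := hf_core_parser_pos ▸ User.Mem.readLE4_lt _ _
  have hpos : c.p.pos < 2 ^ 32 := hp_parser_pos ▸ User.Mem.readLE4_lt _ _
  have hlow : Word.low .w32 (UInt64.ofNat q) = UInt64.ofNat q := Word.low_of_lt _ (by show (UInt64.ofNat q).toNat < 2 ^ 32; v3_omega)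
  have hlowp : Word.low .w32 (UInt64.ofNat c.p.pos) = UInt64.ofNat c.p.pos :=
    Word.low_of_lt _ (by show (UInt64.ofNat c.p.pos).toNat < 2 ^ 32; v3_omega)
  v3_walk hf_core_code hp.call.fetch [hlow, hlowp] until [0x1001ca]
  · exact Reach.done (by strs_fail)

end Str
end S
end J6
end X86
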